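-- pv_equiv track=rewrite | github.com/hed-standard/hed-python | hedschema/hed/converter/tag_compare.py | _split_hed_string
-- ===== SOURCE A (Python) =====
-- def _split_hed_string(hed_string):
--     """Takes a hed string and splits it into delimiters and tags
--
--         Note: This does not validate tags in any form.
--
--     Parameters
--     ----------
--         hed_string: string
--             the hed string to split
--     Returns
--     -------
--     list of tuples.
--         each tuple: (is_hed_tag, (start_pos, end_pos))
--         is_hed_tag: bool
--             This is a hed tag if true, delimiter if not
--         start_pos: int
--             index of start of string in hed_string
--         end_pos: int
--             index of end of string in hed_string
--     """
--     tag_delimiters = ",()~"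
--     current_spacing = 0
--     inside_d = True
--     result_positions = []
--     start_pos = None
--     last_end_pos = None
--     for i, char in enumerate(hed_string):
--         if char == " ":
--             current_spacing += 1
--             continue
--
--         if char in tag_delimiters:
--             if not inside_d:
--                 inside_d = True
--                 if start_pos is not None:
--                     last_end_pos = i - current_spacing
--                     # view_string = hed_string[start_pos: last_end_pos]
--                     result_positions.append((True, (start_pos, last_end_pos)))
--                     current_spacing = 0
--                     start_pos = None
--             continue
--
--         # If we have a current delimiter, end it here.
--         if inside_d and last_end_pos is not None:
--             # view_string = hed_string[last_end_pos: i]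
--             result_positions.append((False, (last_end_pos, i)))
--             last_end_pos = None
--
--         current_spacing = 0
--         inside_d = False
--         if start_pos is None:
--             start_pos = i
--
--     if last_end_pos is not None and len(hed_string) != last_end_pos:
--         # view_string = hed_string[last_end_pos: len(hed_string)]
--         result_positions.append((False, (last_end_pos, len(hed_string))))
--     if start_pos is not None:
--         # view_string = hed_string[start_pos: len(hed_string)]
--         result_positions.append((True, (start_pos, len(hed_string) - current_spacing)))
--
--     # debug_result_strings = [hed_string[startpos:endpos] for (is_hed_string, (startpos, endpos)) in result_positions]
--     return result_positions
-- ===== SOURCE B (Python) =====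
-- def _split_hed_string(hed_string):
--     """Split a hed string into tag and delimiter spans.
--
--     Scans for each tag directly: a tag starts at a non-space, non-delimiter
--     character and runs to the next delimiter (or the end), with trailing
--     spaces trimmed off.  Gaps between tags become delimiter spans; a span
--     after the last tag is emitted only if that tag was stopped by a
--     delimiter character.
--     """
--     delimiters = ",()~"
--     n = len(hed_string)
--     result = []
--     gap_start = None  # trimmed end of the previous tag, if a delimiter followed it
--     i = 0
--     while i < n:
--         if hed_string[i] == " " or hed_string[i] in delimiters:
--             i += 1
--             continue
--         start = i
--         while i < n and hed_string[i] not in delimiters: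
--             i += 1
--         end = i
--         while hed_string[end - 1] == " ":
--             end -= 1
--         if gap_start is not None:
--             result.append((False, (gap_start, start)))
--         result.append((True, (start, end)))
--         gap_start = end if i < n else None
--     if gap_start is not None:
--         result.append((False, (gap_start, n)))
--     return result
-- ===== Notes on version B (the rewrite author's own statement) =====
-- stated objective: simpler
-- what changed: Replaces A's single-pass five-variable state machine (inside_d flag, spacing counter, deferred start/last_end bookkeeping) with a direct scanner: an outer loop finds each tag start, an inner loop runs to the next delimiter, trailing spaces are trimmed backwards, and gap spans are emitted between tags.
import Mathlib
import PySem

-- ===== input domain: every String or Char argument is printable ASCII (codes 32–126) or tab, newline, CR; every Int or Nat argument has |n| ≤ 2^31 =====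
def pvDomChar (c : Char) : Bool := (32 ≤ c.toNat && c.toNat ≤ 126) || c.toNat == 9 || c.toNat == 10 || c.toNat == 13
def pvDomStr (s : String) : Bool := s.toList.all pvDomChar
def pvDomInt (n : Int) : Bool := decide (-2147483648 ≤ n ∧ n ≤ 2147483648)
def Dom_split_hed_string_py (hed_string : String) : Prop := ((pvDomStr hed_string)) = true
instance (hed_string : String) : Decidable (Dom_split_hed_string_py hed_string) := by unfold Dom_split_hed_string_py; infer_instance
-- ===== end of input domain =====

-- B is a simpler direct scanner (outer loop per tag, inner loop to the next delimiter,
-- backward trim) replacing A's five-variable character state machine; return values agree on all inputs.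

-- ===== PORT A =====
-- A's loop state: (current_spacing, inside_d, result_positions, start_pos, last_end_pos)
def aDelims : List Char := [',', '(', ')', '~']

def aLoop : List Char → Int →
    (Int × Bool × List (Bool × (Int × Int)) × Option Int × Option Int) →
    (Int × Bool × List (Bool × (Int × Int)) × Option Int × Option Int)
  | [], _, st => st
  | c :: rest, i, (sp, d, res, stp, le) =>
    if c = ' ' then aLoop rest (i + 1) (sp + 1, d, res, stp, le)
    else if c ∈ aDelims then
      (if d = false then
        match stp with
        | some s => aLoop rest (i + 1) (0, true, res ++ [(true, (s, i - sp))], none, some (i - sp))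
        | none => aLoop rest (i + 1) (sp, true, res, none, le)
      else aLoop rest (i + 1) (sp, d, res, stp, le))
    else
      match d, le with
      | true, some p =>
          aLoop rest (i + 1) (0, false, res ++ [(false, (p, i))],
            (match stp with | none => some i | some s => some s), none)
      | _, _ =>
          aLoop rest (i + 1) (0, false, res,
            (match stp with | none => some i | some s => some s), le)

-- the code after A's loop
def aFinish (st : Int × Bool × List (Bool × (Int × Int)) × Option Int × Option Int)
    (n : Int) : List (Bool × (Int × Int)) :=
  let (sp, _, res, stp, le) := st
  let res := match le with
    | some p => if n ≠ p then res ++ [(false, (p, n))] else res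
    | none => res
  match stp with
  | some s => res ++ [(true, (s, n - sp))]
  | none => res

def split_hed_string_py (hed_string : String) : List (Bool × (Int × Int)) :=
  let chars := hed_string.toList
  aFinish (aLoop chars 0 (0, true, [], none, none)) (chars.length : Int)

-- ===== PORT B =====
def bIsDelim (c : Char) : Bool := c = ',' || c = '(' || c = ')' || c = '~'

-- inner while: consume non-delimiters, returning (consumed run, stop index, remaining chars)
def bScanTag : List Char → Int → List Char × Int × List Char
  | [], i => ([], i, [])
  | c :: rest, i =>
    if bIsDelim c = true then ([], i, c :: rest)
    else
      let t := bScanTag rest (i + 1)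
      (c :: t.1, t.2.1, t.2.2)

-- the backward `while hed_string[end-1] == " ": end -= 1` trim
def bTrim (run : List Char) (j : Int) : Int :=
  j - ((run.reverse.takeWhile (fun c => c = ' ')).length : Int)

theorem bScanTag_rest_length_le : ∀ (l : List Char) (i : Int),
    (bScanTag l i).2.2.length ≤ l.length := by
  intro l
  induction l with
  | nil => intro i; simp [bScanTag]
  | cons c rest ih =>
    intro i
    by_cases hd : bIsDelim c = true
    · simp [bScanTag, hd]
    · simpa [bScanTag, hd] using Nat.le_succ_of_le (ih (i + 1))

-- outer while loop; gap is `gap_start`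
def bLoop : List Char → Int → Int → Option Int → List (Bool × (Int × Int))
  | [], _, n, gap => (match gap with | some g => [(false, (g, n))] | none => [])
  | c :: rest, i, n, gap =>
    if c = ' ' ∨ bIsDelim c = true then bLoop rest (i + 1) n gap
    else
      let t := bScanTag (c :: rest) i
      let e := bTrim t.1 t.2.1
      (match gap with | some g => [(false, (g, i))] | none => []) ++
        (true, (i, e)) :: bLoop t.2.2 t.2.1 n (if t.2.2 ≠ [] then some e else none)
termination_by l _ _ _ => l.length
decreasing_by
  · simp
  · rename_i h
    have hd : bIsDelim c = false := by
      cases hq : bIsDelim c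
      · rfl
      · exact absurd (Or.inr hq) h
    simpa [bScanTag, hd] using
      Nat.lt_succ_of_le (bScanTag_rest_length_le rest (i + 1))

def split_hed_string_py_alt (hed_string : String) : List (Bool × (Int × Int)) :=
  let chars := hed_string.toList
  bLoop chars 0 (chars.length : Int) none

-- ===== PRECONDITION & SPEC =====
def Spec_split_hed_string_py (hed_string : String) (out : List (Bool × (Int × Int))) : Prop := out = split_hed_string_py_alt hed_string
instance (hed_string : String) (out : List (Bool × (Int × Int))) : Decidable (Spec_split_hed_string_py hed_string out) := by unfold Spec_split_hed_string_py; infer_instance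

-- ===== CLAIM (what is proved, stated in full; the proofs are below) =====
def Claim_equal_split_hed_string_py : Prop := ∀ (hed_string : String), Dom_split_hed_string_py hed_string → Spec_split_hed_string_py hed_string (split_hed_string_py hed_string)

-- ===== LEMMAS AND PROOFS =====
-- number of trailing spaces of a run (what bTrim subtracts)
def tsCount (r : List Char) : Int :=
  ((r.reverse.takeWhile (fun c => c = ' ')).length : Int)

-- A's `current_spacing` at the moment the scan of l (starting with spacing sp) hits a delimiter or the end
def spAt : List Char → Int → Int
  | [], sp => sp
  | c :: rest, sp => if bIsDelim c = true then sp else spAt rest (if c = ' ' then sp + 1 else 0)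

theorem mem_aDelims (c : Char) : c ∈ aDelims ↔ bIsDelim c = true := by
  simp [aDelims, bIsDelim]
  tauto

theorem tsCount_cons (c : Char) (r : List Char) :
    tsCount (c :: r) =
      if r.all (fun x => x = ' ') then
        (if c = ' ' then (r.length : Int) + 1 else (r.length : Int))
      else tsCount r := by
  unfold tsCount
  rw [List.reverse_cons, List.takeWhile_append]
  have hiff : ((List.takeWhile (fun c => decide (c = ' ')) r.reverse).length = r.reverse.length)
      ↔ r.all (fun x => decide (x = ' ')) = true := by
    constructor
    · intro h
      have := List.takeWhile_eq_self_iff.mp ((List.takeWhile_sublist _).eq_of_length h)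
      simp only [List.all_eq_true]
      intro x hx
      exact this x (by simpa using hx)
    · intro h
      have : List.takeWhile (fun c => decide (c = ' ')) r.reverse = r.reverse := by
        rw [List.takeWhile_eq_self_iff]
        intro x hx
        simp only [List.all_eq_true] at h
        exact h x (by simpa using hx)
      rw [this]
  split_ifs with h1 h2 h3 h4 h5 <;> simp_all

theorem bScanTag_eq (l : List Char) (i : Int) :
    bScanTag l i = (l.takeWhile (fun c => !bIsDelim c),
      i + ((l.takeWhile (fun c => !bIsDelim c)).length : Int),
      l.dropWhile (fun c => !bIsDelim c)) := by
  induction l generalizing i with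
  | nil => simp [bScanTag]
  | cons c rest ih =>
    by_cases hd : bIsDelim c = true
    · simp [bScanTag, hd]
    · simp only [bScanTag, hd, ih (i + 1), List.takeWhile_cons, List.dropWhile_cons] at *
      simp
      ring

theorem spAt_eq (l : List Char) (sp : Int) :
    spAt l sp =
      (if (l.takeWhile (fun c => !bIsDelim c)).all (fun x => x = ' ')
       then sp + ((l.takeWhile (fun c => !bIsDelim c)).length : Int)
       else tsCount (l.takeWhile (fun c => !bIsDelim c))) := by
  induction l generalizing sp with
  | nil => simp [spAt]
  | cons c rest ih =>
    by_cases hd : bIsDelim c = true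
    · simp [spAt, hd]
    · simp only [spAt, hd, List.takeWhile_cons]
      simp only [Bool.not_false, if_true]
      rw [ih]
      by_cases hc : c = ' '
      · subst hc
        by_cases hall : (rest.takeWhile (fun c => !bIsDelim c)).all (fun x => x = ' ')
        · simp [hall]; ring
        · simp [hall, tsCount_cons]
      · simp only [hc, if_false]
        by_cases hall : (rest.takeWhile (fun c => !bIsDelim c)).all (fun x => x = ' ')
        · simp [hall, hc, tsCount_cons]
        · simp [hall, hc, tsCount_cons]

theorem bLoop_nil (i n : Int) (gap : Option Int) :
    bLoop [] i n gap = (match gap with | some g => [(false, (g, n))] | none => []) := by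
  rw [bLoop.eq_def]

theorem bLoop_skip (c : Char) (rest : List Char) (i n : Int) (gap : Option Int)
    (h : c = ' ' ∨ bIsDelim c = true) :
    bLoop (c :: rest) i n gap = bLoop rest (i + 1) n gap := by
  rw [bLoop.eq_def]
  simp [h]

theorem bLoop_tag (c : Char) (rest : List Char) (i n : Int) (gap : Option Int)
    (h : ¬(c = ' ' ∨ bIsDelim c = true)) :
    bLoop (c :: rest) i n gap =
      (match gap with | some g => [(false, (g, i))] | none => []) ++
        (true, (i, bTrim (bScanTag (c :: rest) i).1 (bScanTag (c :: rest) i).2.1)) ::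
        bLoop (bScanTag (c :: rest) i).2.2 (bScanTag (c :: rest) i).2.1 n
          (if (bScanTag (c :: rest) i).2.2 ≠ [] then
             some (bTrim (bScanTag (c :: rest) i).1 (bScanTag (c :: rest) i).2.1)
           else none) := by
  rw [bLoop.eq_def]
  simp only [h, if_false]

theorem lemT : ∀ (l : List Char) (i sp : Int) (R : List (Bool × (Int × Int))) (s n : Int),
    0 ≤ sp → n = i + (l.length : Int) →
    (∀ (l' : List Char) (i' : Int) (R' : List (Bool × (Int × Int))) (e' : Int),
       l'.length ≤ l.length → n = i' + (l'.length : Int) → e' < i' →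
       aFinish (aLoop l' i' (0, true, R', none, some e')) n = R' ++ bLoop l' i' n (some e')) →
    aFinish (aLoop l i (sp, false, R, some s, none)) n
      = R ++ (true, (s, (bScanTag l i).2.1 - spAt l sp)) ::
          bLoop (bScanTag l i).2.2 (bScanTag l i).2.1 n
            (if (bScanTag l i).2.2 ≠ [] then some ((bScanTag l i).2.1 - spAt l sp) else none) := by
  intro l
  induction l with
  | nil =>
    intro i sp R s n hsp hn hyp
    simp only [List.length_nil, Int.natCast_zero, add_zero] at hn
    simp [aLoop, aFinish, bScanTag, spAt, bLoop_nil, hn]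
  | cons c rest ih =>
    intro i sp R s n hsp hn hyp
    by_cases hc : c = ' '
    · subst hc
      have hstep : aLoop (' ' :: rest) i (sp, false, R, some s, none)
          = aLoop rest (i + 1) (sp + 1, false, R, some s, none) := by
        simp [aLoop]
      rw [hstep, ih (i + 1) (sp + 1) R s n (by omega)
        (by simp at hn ⊢; omega)
        (fun l' i' R' e' h1 h2 h3 => hyp l' i' R' e' (h1.trans (by simp)) h2 h3)]
      have hds : bIsDelim ' ' = false := by decide
      simp [bScanTag, spAt, hds]
    · by_cases hd : bIsDelim c = true
      · have hmem : c ∈ aDelims := (mem_aDelims c).mpr hd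
        have hstep : aLoop (c :: rest) i (sp, false, R, some s, none)
            = aLoop rest (i + 1) (0, true, R ++ [(true, (s, i - sp))], none, some (i - sp)) := by
          simp [aLoop, hc, hmem]
        rw [hstep, hyp rest (i + 1) _ (i - sp) (by simp) (by simp at hn ⊢; omega) (by omega)]
        have hskip : bLoop (c :: rest) i n (some (i - sp))
            = bLoop rest (i + 1) n (some (i - sp)) := bLoop_skip c rest i n _ (Or.inr hd)
        simp [bScanTag, spAt, hd, hskip]
      · have hmem : c ∉ aDelims := fun h => hd ((mem_aDelims c).mp h)
        have hstep : aLoop (c :: rest) i (sp, false, R, some s, none)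
            = aLoop rest (i + 1) (0, false, R, some s, none) := by
          simp [aLoop, hc, hmem]
        rw [hstep, ih (i + 1) 0 R s n le_rfl
          (by simp at hn ⊢; omega)
          (fun l' i' R' e' h1 h2 h3 => hyp l' i' R' e' (h1.trans (by simp)) h2 h3)]
        simp [bScanTag, spAt, hd, hc]

theorem lemD : ∀ (k : Nat) (l : List Char), l.length ≤ k →
    ∀ (i sp : Int) (R : List (Bool × (Int × Int))) (g : Option Int) (n : Int),
    n = i + (l.length : Int) → (∀ p, g = some p → p < i) →
    aFinish (aLoop l i (sp, true, R, none, g)) n = R ++ bLoop l i n g := by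
  intro k
  induction k with
  | zero =>
    intro l hl i sp R g n hn hg
    have hnil : l = [] := List.eq_nil_of_length_eq_zero (Nat.le_zero.mp hl)
    subst hnil
    simp only [List.length_nil, Int.natCast_zero, add_zero] at hn
    cases g with
    | none => simp [aLoop, aFinish, bLoop_nil]
    | some p =>
      have hpi := hg p rfl
      have hne : ¬ n = p := by omega
      simp [aLoop, aFinish, bLoop_nil, hne]
  | succ k ih =>
    intro l hl i sp R g n hn hg
    cases l with
    | nil =>
      simp only [List.length_nil, Int.natCast_zero, add_zero] at hn
      cases g with
      | none => simp [aLoop, aFinish, bLoop_nil]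
      | some p =>
        have hpi := hg p rfl
        have hne : ¬ n = p := by omega
        simp [aLoop, aFinish, bLoop_nil, hne]
    | cons c rest =>
      have hr : rest.length ≤ k := by simp at hl; omega
      by_cases hc : c = ' '
      · subst hc
        have hstep : aLoop (' ' :: rest) i (sp, true, R, none, g)
            = aLoop rest (i + 1) (sp + 1, true, R, none, g) := by simp [aLoop]
        rw [hstep, bLoop_skip ' ' rest i n g (Or.inl rfl)]
        exact ih rest hr (i + 1) (sp + 1) R g n (by simp at hn ⊢; omega)
          (fun p hp => by have := hg p hp; omega)
      · by_cases hd : bIsDelim c = true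
        · have hmem : c ∈ aDelims := (mem_aDelims c).mpr hd
          have hstep : aLoop (c :: rest) i (sp, true, R, none, g)
              = aLoop rest (i + 1) (sp, true, R, none, g) := by
            simp [aLoop, hc, hmem]
          rw [hstep, bLoop_skip c rest i n g (Or.inr hd)]
          exact ih rest hr (i + 1) sp R g n (by simp at hn ⊢; omega)
            (fun p hp => by have := hg p hp; omega)
        · -- a tag starts at i
          have hmem : c ∉ aDelims := fun h => hd ((mem_aDelims c).mp h)
          have hcond : ¬(c = ' ' ∨ bIsDelim c = true) := by tauto
          have hts : tsCount (c :: (bScanTag rest (i + 1)).1) = spAt rest 0 := by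
            rw [bScanTag_eq, spAt_eq, tsCount_cons]
            simp [hc]
          have hsc : bScanTag (c :: rest) i
              = (c :: (bScanTag rest (i + 1)).1, (bScanTag rest (i + 1)).2.1,
                 (bScanTag rest (i + 1)).2.2) := by
            rw [bScanTag]
            simp [hd]
          cases g with
          | none =>
            have hT := lemT rest (i + 1) 0 R i n le_rfl
              (by simp at hn ⊢; omega)
              (fun l' i' R' e' h1 h2 h3 =>
                ih l' (h1.trans hr) i' 0 R' (some e') n h2
                  (fun p hp => by injection hp with hp; omega))
            have hstep : aLoop (c :: rest) i (sp, true, R, none, none)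
                = aLoop rest (i + 1) (0, false, R, some i, none) := by
              simp [aLoop, hc, hmem]
            rw [hstep, hT, bLoop_tag c rest i n none hcond]
            simp only [hsc, bTrim]
            rw [show ((c :: (bScanTag rest (i + 1)).1).reverse.takeWhile (fun c => c = ' ')).length
                  = tsCount (c :: (bScanTag rest (i + 1)).1) from by simp [tsCount], hts]
            simp
          | some p =>
            have hT := lemT rest (i + 1) 0 (R ++ [(false, (p, i))]) i n le_rfl
              (by simp at hn ⊢; omega)
              (fun l' i' R' e' h1 h2 h3 =>
                ih l' (h1.trans hr) i' 0 R' (some e') n h2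
                  (fun q hq => by injection hq with hq; omega))
            have hstep : aLoop (c :: rest) i (sp, true, R, none, some p)
                = aLoop rest (i + 1) (0, false, R ++ [(false, (p, i))], some i, none) := by
              simp [aLoop, hc, hmem]
            rw [hstep, hT, bLoop_tag c rest i n (some p) hcond]
            simp only [hsc, bTrim]
            rw [show ((c :: (bScanTag rest (i + 1)).1).reverse.takeWhile (fun c => c = ' ')).length
                  = tsCount (c :: (bScanTag rest (i + 1)).1) from by simp [tsCount], hts]
            simp

-- ===== VERDICT (by name: the statement is the Claim_ definition above) =====
theorem split_hed_string_py_spec : Claim_equal_split_hed_string_py := by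
  intro s _
  unfold Spec_split_hed_string_py split_hed_string_py split_hed_string_py_alt
  have := lemD s.toList.length s.toList le_rfl 0 0 [] none (s.toList.length : Int)
    (by simp) (by intro p h; cases h)
  simpa using this
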